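-- pv_equiv track=rewrite | github.com/JSebastian-Villa/Analisis_de_algoritmos | codigosbacktracking.py | materias_compatibles
-- ===== SOURCE A (Python) =====
-- def materias_compatibles(materias, incompatibles, k):
--     resultado = []
--
--     def es_compatible(actual, materia):
--         for m in actual:
--             if (m, materia) in incompatibles or (materia, m) in incompatibles:
--                 return False
--         return True
--
--     def backtrack(i, actual):
--         # Caso base válido
--         if len(actual) == k:
--             resultado.append(actual[:])
--             return
--
--         # Si se acabaron las materias
--         if i == len(materias):
--             return
--
--         # Poda: ya no alcanza
--         if len(actual) + (len(materias) - i) < k: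
--             return
--
--         # Opción 1: tomar materia si es compatible
--         if es_compatible(actual, materias[i]):
--             actual.append(materias[i])
--             backtrack(i + 1, actual)
--             actual.pop()
--
--         # Opción 2: no tomarla
--         backtrack(i + 1, actual)
--
--     backtrack(0, [])
--     return resultado
-- ===== SOURCE B (Python) =====
-- def materias_compatibles(materias, incompatibles, k):
--     # Level-wise (breadth-first) generation: extend partial combinations k times,
--     # then filter whole combinations for pairwise compatibility.
--     if k < 0 or k > len(materias):
--         return []
--
--     def picks(rest):
--         # each way to pick one element of rest together with the suffix after it
--         out = []
--         while rest:
--             out.append((rest[0], rest[1:]))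
--             rest = rest[1:]
--         return out
--
--     def ok(c):
--         if not c:
--             return True
--         a, rest = c[0], c[1:]
--         return all((a, b) not in incompatibles and (b, a) not in incompatibles
--                    for b in rest) and ok(rest)
--
--     states = [([], materias)]
--     for _ in range(k):
--         states = [(chosen + [x], r2) for chosen, rest in states for x, r2 in picks(rest)]
--     return [chosen for chosen, rest in states if ok(chosen)]
-- ===== Notes on version B (the rewrite author's own statement) =====
-- stated objective: alternative
-- what changed: Replaces A's depth-first backtracking with incremental compatibility pruning by a breadth-first level-wise generation of all index-increasing k-combinations (extending a list of (chosen,suffix) states k times) followed by a whole-subset pairwise-compatibility filter.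
import Mathlib
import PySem

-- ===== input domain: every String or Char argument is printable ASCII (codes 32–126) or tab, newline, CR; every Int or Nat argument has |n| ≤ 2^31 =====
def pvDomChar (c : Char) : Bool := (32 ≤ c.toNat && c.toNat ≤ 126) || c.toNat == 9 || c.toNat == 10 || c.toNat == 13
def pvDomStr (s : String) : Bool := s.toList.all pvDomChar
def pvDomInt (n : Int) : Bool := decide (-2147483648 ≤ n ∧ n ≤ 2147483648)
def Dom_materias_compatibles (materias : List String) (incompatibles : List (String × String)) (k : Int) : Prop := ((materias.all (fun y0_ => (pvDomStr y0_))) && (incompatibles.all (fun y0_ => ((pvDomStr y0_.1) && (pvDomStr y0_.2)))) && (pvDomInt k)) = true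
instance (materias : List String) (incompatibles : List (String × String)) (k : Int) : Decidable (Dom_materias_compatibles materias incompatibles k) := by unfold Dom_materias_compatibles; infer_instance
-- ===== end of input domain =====

-- B replaces A's depth-first backtracking (with incremental pruning) by a breadth-first
-- level-wise generation of the k-combinations followed by a whole-subset pairwise filter;
-- objective: alternative algorithm of similar cost (return values proved identical).

-- ===== PORT A =====
-- es_compatible: loop over `actual`, early return False on an incompatible pair.
def esCompatibleA (incompatibles : List (String × String)) (actual : List String) (materia : String) : Bool :=
  match actual with
  | [] => true
  | m :: rest =>
    if incompatibles.contains (m, materia) || incompatibles.contains (materia, m) then false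
    else esCompatibleA incompatibles rest materia

-- backtrack(i, actual): the index i is represented by the suffix materias[i:] =: rest,
-- so materias[i] = rest.head and len(materias) - i = rest.length (exact transliteration).
def backtrackA (incompatibles : List (String × String)) (k : Int) (actual rest : List String) :
    List (List String) :=
  if (actual.length : Int) = k then [actual]
  else
    match rest with
    | [] => []
    | m :: r =>
      if (actual.length : Int) + ((m :: r).length : Int) < k then []
      else
        (if esCompatibleA incompatibles actual m then
            backtrackA incompatibles k (actual ++ [m]) r
          else []) ++ backtrackA incompatibles k actual r
  termination_by rest.length

def materias_compatibles (materias : List String) (incompatibles : List (String × String)) (k : Int) : List (List String) :=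
  backtrackA incompatibles k [] materias

-- ===== PORT B =====
-- picks(rest): each way to pick one element together with the suffix after it.
def picksB : List String → List (String × List String)
  | [] => []
  | x :: r => (x, r) :: picksB r

-- ok(c): first element compatible with every later one, recursively.
def okPairsB (incompatibles : List (String × String)) : List String → Bool
  | [] => true
  | a :: rest =>
    (rest.all fun b => !(incompatibles.contains (a, b) || incompatibles.contains (b, a))) &&
      okPairsB incompatibles rest

-- one round of the `for _ in range(k)` loop
def stepB (states : List (List String × List String)) : List (List String × List String) :=
  states.flatMap (fun s => (picksB s.2).map (fun p => (s.1 ++ [p.1], p.2)))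

def materias_compatibles_alt (materias : List String) (incompatibles : List (String × String)) (k : Int) : List (List String) :=
  if k < 0 ∨ (materias.length : Int) < k then []
  else
    let states := (PySem.List.pyRange 0 k 1).foldl (fun st _ => stepB st) [([], materias)]
    (states.filter (fun s => okPairsB incompatibles s.1)).map Prod.fst

-- ===== PRECONDITION & SPEC =====
def Spec_materias_compatibles (materias : List String) (incompatibles : List (String × String)) (k : Int) (out : List (List String)) : Prop := out = materias_compatibles_alt materias incompatibles k
instance (materias : List String) (incompatibles : List (String × String)) (k : Int) (out : List (List String)) : Decidable (Spec_materias_compatibles materias incompatibles k out) := by unfold Spec_materias_compatibles; infer_instance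

-- ===== CLAIM (what is proved, stated in full; the proofs are below) =====
def Claim_equal_materias_compatibles : Prop := ∀ (materias : List String) (incompatibles : List (String × String)) (k : Int), Dom_materias_compatibles materias incompatibles k → Spec_materias_compatibles materias incompatibles k (materias_compatibles materias incompatibles k)

-- ===== LEMMAS AND PROOFS =====

-- canonical list of the j-element (index-increasing) combinations of r, in lex order
def comb : List String → Nat → List (List String)
  | _, 0 => [[]]
  | [], _ + 1 => []
  | x :: r, j + 1 => (comb r j).map (x :: ·) ++ comb r (j + 1)

-- combinations carrying the remaining suffix (B's state shape)
def combE : List String → Nat → List (List String × List String)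
  | r, 0 => [([], r)]
  | [], _ + 1 => []
  | x :: r, j + 1 => (combE r j).map (fun s => (x :: s.1, s.2)) ++ combE r (j + 1)

def compatP (incompatibles : List (String × String)) (a b : String) : Bool :=
  !(incompatibles.contains (a, b) || incompatibles.contains (b, a))

-- A's incremental acceptance of the extension `ext` after prefix `acc`
def goodA (incompatibles : List (String × String)) : List String → List String → Bool
  | _, [] => true
  | acc, x :: ext => esCompatibleA incompatibles acc x && goodA incompatibles (acc ++ [x]) ext

theorem esCompatibleA_eq_all (inc : List (String × String)) (actual : List String) (x : String) :
    esCompatibleA inc actual x = actual.all (fun m => compatP inc m x) := by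
  induction actual with
  | nil => rfl
  | cons m rest ih =>
    simp only [esCompatibleA, List.all_cons, compatP, ih]
    by_cases h : (inc.contains (m, x) || inc.contains (x, m)) = true <;> simp [compatP, h]

theorem all_and_eq {α : Type} (l : List α) (f g : α → Bool) :
    l.all (fun a => f a && g a) = (l.all f && l.all g) := by
  induction l with
  | nil => rfl
  | cons a l ih =>
    simp only [List.all_cons, ih]
    by_cases hf : f a <;> by_cases hg : g a <;> simp [hf, hg]

theorem goodA_eq (inc : List (String × String)) (ext acc : List String) :
    goodA inc acc ext =
      (acc.all (fun a => ext.all (fun b => compatP inc a b)) && okPairsB inc ext) := by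
  induction ext generalizing acc with
  | nil => simp [goodA, okPairsB]
  | cons x ext ih =>
    simp only [goodA, okPairsB, ih, esCompatibleA_eq_all, List.all_append, List.all_cons,
      List.all_nil, Bool.and_true]
    rw [all_and_eq]
    have : (fun b => !(inc.contains (x, b) || inc.contains (b, x))) =
        (fun b => compatP inc x b) := rfl
    rw [this]
    by_cases h1 : acc.all (fun a => compatP inc a x) <;>
      by_cases h2 : acc.all (fun a => ext.all (fun b => compatP inc a b)) <;>
      by_cases h3 : ext.all (fun b => compatP inc x b) <;>
      by_cases h4 : okPairsB inc ext <;>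
      simp [h1, h2, h3, h4]

theorem comb_nil_of_lt (r : List String) (j : Nat) (h : r.length < j) : comb r j = [] := by
  induction r generalizing j with
  | nil =>
    match j, h with
    | j + 1, _ => rfl
  | cons x r ih =>
    match j, h with
    | j + 1, h =>
      have h1 : r.length < j := by simpa using h
      simp [comb, ih j h1, ih (j + 1) (Nat.lt_succ_of_lt h1)]

theorem backtrackA_nil (inc : List (String × String)) (k : Int) (actual : List String) :
    backtrackA inc k actual [] = if (actual.length : Int) = k then [actual] else [] := by
  rw [backtrackA]

theorem backtrackA_cons (inc : List (String × String)) (k : Int) (actual : List String)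
    (m : String) (r : List String) :
    backtrackA inc k actual (m :: r) =
      if (actual.length : Int) = k then [actual]
      else if (actual.length : Int) + ((m :: r).length : Int) < k then []
      else
        (if esCompatibleA inc actual m then backtrackA inc k (actual ++ [m]) r else []) ++
          backtrackA inc k actual r := by
  rw [backtrackA]

theorem backtrackA_of_gt (inc : List (String × String)) (k : Int) (rest actual : List String)
    (h : k < (actual.length : Int)) : backtrackA inc k actual rest = [] := by
  induction rest generalizing actual with
  | nil => rw [backtrackA_nil, if_neg (by omega)]
  | cons m r ih =>
    rw [backtrackA_cons, if_neg (by omega : ¬ ((actual.length : Int) = k))]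
    by_cases hp : (actual.length : Int) + ((m :: r).length : Int) < k
    · rw [if_pos hp]
    · rw [if_neg hp, ih (actual ++ [m]) (by simp; omega), ih actual h]
      simp

theorem backtrackA_eq (inc : List (String × String)) (k : Int) (rest : List String) :
    ∀ (actual : List String) (j : Nat), (actual.length : Int) + (j : Int) = k →
      backtrackA inc k actual rest =
        (comb rest j).filterMap
          (fun ext => if goodA inc actual ext then some (actual ++ ext) else none) := by
  induction rest with
  | nil =>
    intro actual j hj
    match j, hj with
    | 0, hj =>
      rw [backtrackA_nil, if_pos (by omega : (actual.length : Int) = k)]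
      simp [comb, goodA]
    | j + 1, hj =>
      rw [backtrackA_nil, if_neg (by push_cast at hj ⊢; omega : ¬ ((actual.length : Int) = k))]
      simp [comb]
  | cons m r ih =>
    intro actual j hj
    match j, hj with
    | 0, hj =>
      rw [backtrackA_cons, if_pos (by omega : (actual.length : Int) = k)]
      simp [comb, goodA]
    | j + 1, hj =>
      have hne : ¬ ((actual.length : Int) = k) := by push_cast at hj ⊢; omega
      rw [backtrackA_cons, if_neg hne]
      by_cases hp : (actual.length : Int) + ((m :: r).length : Int) < k
      · have hr : r.length < j := by simp at hp; push_cast at hj hp; omega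
        rw [if_pos hp]
        simp [comb, comb_nil_of_lt r j hr, comb_nil_of_lt r (j + 1) (Nat.lt_succ_of_lt hr)]
      · have ih1 := ih (actual ++ [m]) j (by push_cast at hj ⊢; simp; omega)
        have ih2 := ih actual (j + 1) hj
        rw [if_neg hp, ih1, ih2]
        simp only [comb, List.filterMap_append, List.filterMap_map]
        congr 1
        by_cases hc : esCompatibleA inc actual m
        · simp only [hc, if_true]
          apply List.filterMap_congr
          intro ext _
          have hg : goodA inc actual (m :: ext) = goodA inc (actual ++ [m]) ext := by
            simp [goodA, hc]
          simp only [Function.comp_apply, hg]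
          by_cases h : goodA inc (actual ++ [m]) ext <;> simp [h]
        · have hc' : esCompatibleA inc actual m = false := by simpa using hc
          rw [hc']
          simp only [Bool.false_eq_true, if_false]
          symm
          apply List.filterMap_eq_nil_iff.mpr
          intro ext _
          have hg : goodA inc actual (m :: ext) = false := by simp [goodA, hc']
          simp [hg]

theorem stepB_combE (r : List String) (j : Nat) : stepB (combE r j) = combE r (j + 1) := by
  induction r generalizing j with
  | nil =>
    match j with
    | 0 => rfl
    | j + 1 => rfl
  | cons x r ih =>
    match j with
    | 0 =>
      show stepB [([], x :: r)] = combE (x :: r) 1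
      have h0 : stepB [([], x :: r)] = (picksB (x :: r)).map (fun p => ([p.1], p.2)) := by
        simp [stepB]
      have h1 : stepB (combE r 0) = combE r 1 := ih 0
      have h2 : stepB (combE r 0) = (picksB r).map (fun p => ([p.1], p.2)) := by
        simp [combE, stepB]
      simp only [h0, picksB, List.map_cons, combE]
      rw [← h1, h2]
      rfl
    | j + 1 =>
      have hmap : stepB ((combE r j).map (fun s => (x :: s.1, s.2))) =
          (stepB (combE r j)).map (fun s => (x :: s.1, s.2)) := by
        simp only [stepB, List.flatMap_map, List.map_flatMap, List.map_map]
        rfl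
      simp only [combE, stepB, List.flatMap_append]
      show stepB ((combE r j).map (fun s => (x :: s.1, s.2))) ++ stepB (combE r (j+1)) = _
      rw [hmap, ih j, ih (j + 1)]

theorem foldl_const_iterate {α β : Type} (f : α → α) (l : List β) (s : α) :
    l.foldl (fun st _ => f st) s = f^[l.length] s := by
  induction l generalizing s with
  | nil => rfl
  | cons b l ih => simp [List.foldl_cons, ih, Function.iterate_succ_apply]

theorem iterate_stepB (r : List String) (j : Nat) : stepB^[j] [([], r)] = combE r j := by
  induction j with
  | zero => simp [combE]
  | succ j ih => rw [Function.iterate_succ_apply', ih, stepB_combE]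

theorem combE_fst (r : List String) (j : Nat) : (combE r j).map Prod.fst = comb r j := by
  induction r generalizing j with
  | nil =>
    match j with
    | 0 => rfl
    | j + 1 => rfl
  | cons x r ih =>
    match j with
    | 0 => rfl
    | j + 1 =>
      simp only [combE, comb, List.map_append, List.map_map, ← ih j, ← ih (j + 1)]
      congr 1

theorem filterMap_if (l : List (List String)) (p : List String → Bool) :
    l.filterMap (fun ext => if p ext then some ext else none) = l.filter p := by
  induction l with
  | nil => rfl
  | cons a l ih => by_cases h : p a <;> simp [h, ih]

theorem backtrackA_of_short (inc : List (String × String)) (k : Int) (rest actual : List String)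
    (h : (actual.length : Int) + (rest.length : Int) < k) : backtrackA inc k actual rest = [] := by
  induction rest generalizing actual with
  | nil => rw [backtrackA_nil, if_neg (by simp at h; omega)]
  | cons m r ih =>
    rw [backtrackA_cons, if_neg (by simp at h ⊢; omega), if_pos h]

-- ===== VERDICT (by name: the statement is the Claim_ definition above) =====
theorem materias_compatibles_spec : Claim_equal_materias_compatibles := by
  intro materias inc k _
  show materias_compatibles materias inc k = materias_compatibles_alt materias inc k
  by_cases hk : k < 0
  · rw [materias_compatibles, backtrackA_of_gt inc k materias [] (by simpa using hk)]
    simp [materias_compatibles_alt, hk]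
  · by_cases hk2 : (materias.length : Int) < k
    · rw [materias_compatibles, backtrackA_of_short inc k materias [] (by simpa using hk2)]
      simp [materias_compatibles_alt, hk2]
    rw [not_lt] at hk
    have hA := backtrackA_eq inc k materias [] k.toNat (by simp; omega)
    simp only [List.nil_append] at hA
    have hgood : ∀ ext, goodA inc [] ext = okPairsB inc ext := by
      intro ext; rw [goodA_eq]; simp
    have hA2 : materias_compatibles materias inc k = (comb materias k.toNat).filter (okPairsB inc) := by
      rw [materias_compatibles, hA]
      rw [show (fun ext => if goodA inc [] ext then some ext else none)
            = (fun ext => if okPairsB inc ext then some ext else none) by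
          funext ext; rw [hgood]]
      exact filterMap_if _ _
    have hlen : (PySem.List.pyRange 0 k 1).length = k.toNat := by
      rw [PySem.List.length_pyRange_one]; omega
    have hB : materias_compatibles_alt materias inc k = (comb materias k.toNat).filter (okPairsB inc) := by
      simp only [materias_compatibles_alt]
      rw [if_neg (by omega : ¬ (k < 0 ∨ (materias.length : Int) < k))]
      rw [foldl_const_iterate, hlen, iterate_stepB]
      rw [show (fun s : List String × List String => okPairsB inc s.1)
            = (okPairsB inc ∘ Prod.fst) from rfl]
      rw [← List.filter_map, combE_fst]
    rw [hA2, hB]
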